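-- pv_equiv track=rewrite | github.com/jjjiia/censusAmericans2026 | post_household_thread_OLD.py | find_first_queued_household
-- ===== SOURCE A (Python) =====
-- from collections import OrderedDict
--
-- STATUS_QUEUED = "queued"
--
-- def norm_status(value: str) -> str:
--     return (value or "").strip().lower()
--
-- def find_first_queued_household(rows):
--     grouped = OrderedDict()
--
--     for idx, row in enumerate(rows):
--         household_id = (row.get("household_id") or "").strip()
--         if not household_id:
--             continue
--         grouped.setdefault(household_id, []).append((idx, row))
--
--     for household_id, members in grouped.items():
--         queued_members = []
--         for idx, row in members:
--             status = norm_status(row.get("status"))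
--             text = (row.get("paragraph") or "").strip()
--             if text and status in ("", STATUS_QUEUED):
--                 queued_members.append((idx, row))
--
--         if queued_members:
--             return household_id, queued_members
--
--     return None, None
-- ===== SOURCE B (Python) =====
-- STATUS_QUEUED = "queued"
--
-- def norm_status(value):
--     return (value or "").strip().lower()
--
-- def _hid(row):
--     return (row.get("household_id") or "").strip()
--
-- def _qualifies(row):
--     status = norm_status(row.get("status"))
--     text = (row.get("paragraph") or "").strip()
--     return bool(text) and status in ("", STATUS_QUEUED)
--
-- def find_first_queued_household(rows):
--     # No grouping at all: compute the set of household ids that have at least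
--     # one qualifying member, then the answer household is the one of the first
--     # row whose id is in that set (= first household by appearance with a
--     # queued member); its queued members are a single filter over the rows.
--     winners = {_hid(r) for r in rows if _hid(r) and _qualifies(r)}
--     for row in rows:
--         h = _hid(row)
--         if h in winners:
--             return h, [(i, r) for i, r in enumerate(rows) if _hid(r) == h and _qualifies(r)]
--     return None, None
-- ===== Notes on version B (the rewrite author's own statement) =====
-- stated objective: alternative
-- what changed: B builds no per-household groups at all: it computes the set of household ids that own a qualifying row, scans the rows once for the first appearance of any such id, and produces that household's queued members with one filter comprehension, whereas A materialises an OrderedDict of all members per household and then filters each group.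
import Mathlib
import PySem

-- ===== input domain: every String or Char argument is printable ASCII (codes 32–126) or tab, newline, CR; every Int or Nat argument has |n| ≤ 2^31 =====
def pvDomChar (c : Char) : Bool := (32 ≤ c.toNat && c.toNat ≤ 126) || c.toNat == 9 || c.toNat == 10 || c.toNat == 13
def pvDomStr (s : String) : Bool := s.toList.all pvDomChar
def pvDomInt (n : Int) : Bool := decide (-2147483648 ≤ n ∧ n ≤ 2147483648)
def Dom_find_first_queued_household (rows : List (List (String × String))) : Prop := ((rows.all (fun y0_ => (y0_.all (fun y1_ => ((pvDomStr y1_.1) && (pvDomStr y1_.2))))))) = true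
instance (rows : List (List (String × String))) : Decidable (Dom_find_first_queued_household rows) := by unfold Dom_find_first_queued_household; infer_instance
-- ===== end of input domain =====

-- B drops A's per-household grouping: it builds only the set of household ids owning a
-- qualifying row, scans rows for the first appearance of such an id, and filters once for
-- that household's queued members; objective: alternative algorithm (same asymptotic cost).

-- ===== PORT A =====

-- module helper norm_status (value may be Python None → Option String)
def norm_status (value : Option String) : String :=
  PySem.Str.lower (PySem.Str.strip (value.getD ""))

-- A's second loop: 'for household_id, members in grouped.items(): …' with early return
def find_first_queued_household_findLoop :
    List (String × List (Int × List (String × String))) →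
      Option String × (Option (List (Int × (List (String × String)))))
  | [] => (none, none)
  | (household_id, members) :: rest =>
      let queued_members := members.foldl (fun queued_members p =>
        let status := norm_status ((PySem.Dict.mk p.2).get? "status")
        let text := PySem.Str.strip (((PySem.Dict.mk p.2).get? "paragraph").getD "")
        if text ≠ "" ∧ (status = "" ∨ status = "queued") then queued_members ++ [p]
        else queued_members) []
      if queued_members ≠ [] then (some household_id, some queued_members)
      else find_first_queued_household_findLoop rest

def find_first_queued_household (rows : List (List (String × String))) :
    Option String × (Option (List (Int × (List (String × String))))) :=
  let grouped := (PySem.List.enumerate rows 0).foldl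
    (fun grouped p =>
      let household_id := PySem.Str.strip (((PySem.Dict.mk p.2).get? "household_id").getD "")
      if household_id = "" then grouped
      else grouped.modify household_id [] (fun ms => ms ++ [p]))
    PySem.Dict.empty
  find_first_queued_household_findLoop grouped.items

-- ===== PORT B =====

-- B's helper _hid(row)
def altHid (row : List (String × String)) : String :=
  PySem.Str.strip (((PySem.Dict.mk row).get? "household_id").getD "")

-- B's helper _qualifies(row)
def altQualifies (row : List (String × String)) : Bool :=
  let status := norm_status ((PySem.Dict.mk row).get? "status")
  let text := PySem.Str.strip (((PySem.Dict.mk row).get? "paragraph").getD "")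
  decide (text ≠ "" ∧ (status = "" ∨ status = "queued"))

-- B's member comprehension '[(i, r) for i, r in enumerate(rows) if _hid(r) == h and _qualifies(r)]'
def altCollect (rows : List (List (String × String))) (h : String) :
    List (Int × List (String × String)) :=
  (PySem.List.enumerate rows 0).filter (fun p => altHid p.2 == h && altQualifies p.2)

-- B's scan 'for row in rows: …' with early return
def altScan (rows : List (List (String × String))) (winners : PySem.Set String) :
    List (List (String × String)) →
      Option String × (Option (List (Int × (List (String × String)))))
  | [] => (none, none)
  | r :: rest =>
      let h := altHid r
      if PySem.Set.contains winners h then (some h, some (altCollect rows h))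
      else altScan rows winners rest

def find_first_queued_household_alt (rows : List (List (String × String))) :
    Option String × (Option (List (Int × (List (String × String))))) :=
  let winners : PySem.Set String :=
    PySem.Set.ofList ((rows.filter (fun r => decide (altHid r ≠ "") && altQualifies r)).map altHid)
  altScan rows winners rows

-- ===== PRECONDITION & SPEC =====
def Spec_find_first_queued_household (rows : List (List (String × String))) (out : Option String × (Option (List (Int × (List (String × String)))))) : Prop := out = find_first_queued_household_alt rows
instance (rows : List (List (String × String))) (out : Option String × (Option (List (Int × (List (String × String)))))) : Decidable (Spec_find_first_queued_household rows out) := by unfold Spec_find_first_queued_household; infer_instance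

-- ===== CLAIM (what is proved, stated in full; the proofs are below) =====
def Claim_equal_find_first_queued_household : Prop := ∀ (rows : List (List (String × String))), Dom_find_first_queued_household rows → Spec_find_first_queued_household rows (find_first_queued_household rows)

-- ===== LEMMAS AND PROOFS =====

-- per-pair qualifying predicate
def qpair (p : Int × List (String × String)) : Bool := altQualifies p.2

-- the queued members of household s among the valid pairs l'
def qmem (l' : List (Int × List (String × String))) (s : String) :
    List (Int × List (String × String)) :=
  (l'.filter (fun p => altHid p.2 == s)).filter qpair

-- A's key-scanning loop, abstracted over the key list
def scanK (l' : List (Int × List (String × String))) :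
    List String → Option String × (Option (List (Int × (List (String × String)))))
  | [] => (none, none)
  | s :: ss => if qmem l' s ≠ [] then (some s, some (qmem l' s)) else scanK l' ss

-- A's inner collecting loop is a filter by qpair
lemma innerA_eq_filter (members : List (Int × List (String × String)))
    (acc : List (Int × List (String × String))) :
    members.foldl (fun queued_members p =>
        let status := norm_status ((PySem.Dict.mk p.2).get? "status")
        let text := PySem.Str.strip (((PySem.Dict.mk p.2).get? "paragraph").getD "")
        if text ≠ "" ∧ (status = "" ∨ status = "queued") then queued_members ++ [p]
        else queued_members) acc
      = acc ++ members.filter qpair := by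
  induction members generalizing acc with
  | nil => simp
  | cons p rest ih =>
      simp only [List.foldl_cons, List.filter_cons, ih]
      by_cases h : (PySem.Str.strip (((PySem.Dict.mk p.2).get? "paragraph").getD "") ≠ ""
          ∧ (norm_status ((PySem.Dict.mk p.2).get? "status") = ""
             ∨ norm_status ((PySem.Dict.mk p.2).get? "status") = "queued")) <;>
        simp [qpair, altQualifies, h]

-- A's findLoop over (key, members) pairs built from the key list = scanK
lemma findLoop_eq_scanK (l' : List (Int × List (String × String))) (ks : List String) :
    find_first_queued_household_findLoop
        (ks.map (fun s => (s, l'.filter (fun p => altHid p.2 == s))))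
      = scanK l' ks := by
  induction ks with
  | nil => rfl
  | cons s ss ih =>
      simp only [List.map_cons, find_first_queued_household_findLoop, innerA_eq_filter,
        List.nil_append, scanK, ih, qmem]

-- valid pairs: enumerated rows with a non-empty household id
def vpairs (rows : List (List (String × String))) : List (Int × List (String × String)) :=
  (PySem.List.enumerate rows 0).filter (fun p => decide (altHid p.2 ≠ ""))

-- A's grouping loop body, named
def stepA (grouped : PySem.Dict String (List (Int × List (String × String))))
    (p : Int × List (String × String)) :
    PySem.Dict String (List (Int × List (String × String))) :=
  let household_id := PySem.Str.strip (((PySem.Dict.mk p.2).get? "household_id").getD "")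
  if household_id = "" then grouped
  else grouped.modify household_id [] (fun ms => ms ++ [p])

lemma stepA_eq : stepA = fun d p =>
    if altHid p.2 ≠ "" then d.modify (altHid p.2) [] (fun ms => ms ++ [p]) else d := by
  funext d p
  by_cases h : altHid p.2 = "" <;> simp [stepA, altHid, h]

-- the grouping fold, restricted to the valid pairs
lemma foldA_eq (rows : List (List (String × String)))
    (d : PySem.Dict String (List (Int × List (String × String)))) :
    (PySem.List.enumerate rows 0).foldl stepA d
      = (vpairs rows).foldl (fun d p => d.modify (altHid p.2) [] (fun ms => ms ++ [p])) d := by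
  rw [stepA_eq, vpairs]
  exact PySem.List.foldl_ite_eq_foldl_filter _ _ _ _

-- keys of the grouped dict: first-seen valid household ids
lemma keysA (rows : List (List (String × String))) :
    ((PySem.List.enumerate rows 0).foldl stepA PySem.Dict.empty).keys
      = PySem.Set.ofList ((vpairs rows).map (fun p => altHid p.2)) := by
  rw [foldA_eq]
  rw [PySem.Dict.keys_foldl_modify_key]
  simp [PySem.Dict.keys_empty, PySem.Set.update_nil_left]

lemma nodup_keysA (rows : List (List (String × String))) :
    ((PySem.List.enumerate rows 0).foldl stepA PySem.Dict.empty).keys.Nodup := by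
  rw [keysA]
  exact PySem.Set.nodup_ofList _

-- values of the grouped dict: all valid pairs of that household, in order
lemma getDA (rows : List (List (String × String))) (s : String) :
    ((PySem.List.enumerate rows 0).foldl stepA PySem.Dict.empty).getD s []
      = (vpairs rows).filter (fun p => altHid p.2 == s) := by
  rw [foldA_eq]
  have hmap : (vpairs rows).foldl (fun d p => d.modify (altHid p.2) [] (fun ms => ms ++ [p]))
      PySem.Dict.empty
      = ((vpairs rows).map (fun p => (altHid p.2, p))).foldl
          (fun d pr => d.modify pr.1 [] (fun ms => ms ++ [pr.2])) PySem.Dict.empty := by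
    rw [List.foldl_map]
  rw [hmap, PySem.Dict.getD_foldl_modify_append]
  simp [PySem.Dict.getD_empty, List.filter_map, List.map_map, Function.comp_def]

-- A = scanK over the first-seen key list
lemma A_eq_scanK (rows : List (List (String × String))) :
    find_first_queued_household rows
      = scanK (vpairs rows) (PySem.Set.ofList ((vpairs rows).map (fun p => altHid p.2))) := by
  have hA : find_first_queued_household rows
      = find_first_queued_household_findLoop
          ((PySem.List.enumerate rows 0).foldl stepA PySem.Dict.empty).items := rfl
  rw [hA, PySem.Dict.items_eq_map_keys _ (nodup_keysA rows) []]
  rw [← findLoop_eq_scanK (vpairs rows), keysA]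
  congr 1
  refine List.map_congr_left (fun s _ => ?_)
  rw [getDA]


-- B's winner set holds exactly the non-empty ids owning a queued member among the valid pairs
lemma winners_mem (rows : List (List (String × String))) (s : String) :
    PySem.Set.contains
        (PySem.Set.ofList
          ((rows.filter (fun r => decide (altHid r ≠ "") && altQualifies r)).map altHid)) s = true
      ↔ (s ≠ "" ∧ qmem (vpairs rows) s ≠ []) := by
  constructor
  · intro hc
    have hmem : s ∈ (rows.filter (fun r => decide (altHid r ≠ "") && altQualifies r)).map altHid := by
      simpa [PySem.Set.contains, PySem.Set.mem_ofList] using hc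
    obtain ⟨r, hr, hrs⟩ := List.mem_map.mp hmem
    obtain ⟨hrr, hcond⟩ := List.mem_filter.mp hr
    simp only [Bool.and_eq_true, decide_eq_true_eq] at hcond
    obtain ⟨i, hi, hri⟩ := List.mem_iff_getElem.mp hrr
    refine ⟨hrs ▸ hcond.1, ?_⟩
    apply List.ne_nil_of_mem (a := ((0 + (i : Int)), r))
    have hpmem : ((0 + (i : Int)), r) ∈ PySem.List.enumerate rows 0 := by
      rw [PySem.List.mem_enumerate_iff]
      exact ⟨i, hi, by rw [hri]⟩
    simp only [qmem, vpairs, List.mem_filter]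
    exact ⟨⟨⟨hpmem, by simp [hcond.1]⟩, by simp [hrs]⟩, by simp [qpair, hcond.2]⟩
  · rintro ⟨hs, hq⟩
    obtain ⟨p, hp⟩ := List.exists_mem_of_ne_nil _ hq
    simp only [qmem, vpairs, List.mem_filter] at hp
    obtain ⟨⟨⟨hpe, hne⟩, hks⟩, hqp⟩ := hp
    have hrow : p.2 ∈ rows := by
      rw [PySem.List.mem_enumerate_iff] at hpe
      obtain ⟨k, hk, hpk⟩ := hpe
      rw [hpk]
      exact List.getElem_mem _
    have hmem : s ∈ (rows.filter (fun r => decide (altHid r ≠ "") && altQualifies r)).map altHid :=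
      List.mem_map.mpr ⟨p.2,
        List.mem_filter.mpr ⟨hrow, by simp only [Bool.and_eq_true]; exact ⟨hne, hqp⟩⟩,
        by simpa using hks⟩
    simpa [PySem.Set.contains, PySem.Set.mem_ofList] using hmem

-- B's collected members coincide with A's queued members of a non-empty household id
lemma collect_eq_qmem (rows : List (List (String × String))) (s : String) (hs : s ≠ "") :
    altCollect rows s = qmem (vpairs rows) s := by
  simp only [altCollect, qmem, vpairs, qpair, List.filter_filter]
  refine List.filter_congr (fun p _ => ?_)
  by_cases h : altHid p.2 = s
  · by_cases hq : altQualifies p.2 <;> simp [h, hq, hs]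
  · have hb : (altHid p.2 == s) = false := by simpa using h
    simp [hb]

-- the snd-projection of filtered enumerated pairs is the filtered rows
lemma map_snd_filter_enumerate {α β : Type} (xs : List α) (s0 : Int)
    (c : α → Bool) (g : α → β) :
    (((PySem.List.enumerate xs s0).filter (fun p => c p.2)).map (fun p => g p.2))
      = (xs.filter c).map g := by
  induction xs generalizing s0 with
  | nil => simp [PySem.List.enumerate_nil]
  | cons x xs ih =>
      simp only [PySem.List.enumerate_cons, List.filter_cons]
      by_cases h : c x <;> simp [h, ih (s0 + 1)]

-- B's first-seen key accumulator
def buildK (ks : List String) (l : List (List (String × String))) : List String :=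
  l.foldl (fun ks r => if altHid r ≠ "" then PySem.Set.add ks (altHid r) else ks) ks

-- one accumulator step, as an equation
lemma buildK_cons (ks : List String) (r : List (String × String))
    (l : List (List (String × String))) :
    buildK ks (r :: l)
      = buildK (if altHid r ≠ "" then PySem.Set.add ks (altHid r) else ks) l := rfl

lemma set_add_of_mem (ks : List String) (x : String) (h : x ∈ ks) :
    PySem.Set.add ks x = ks := by
  simp [PySem.Set.add, PySem.Set.contains, h]

lemma set_add_of_not_mem (ks : List String) (x : String) (h : x ∉ ks) :
    PySem.Set.add ks x = ks ++ [x] := by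
  simp [PySem.Set.add, PySem.Set.contains, h]

-- A's key list is what B's accumulator builds over the rows
lemma K_eq_buildK (rows : List (List (String × String))) :
    PySem.Set.ofList ((vpairs rows).map (fun p => altHid p.2)) = buildK [] rows := by
  rw [vpairs,
    congrArg PySem.Set.ofList
      (map_snd_filter_enumerate rows 0 (fun r => decide (altHid r ≠ "")) altHid),
    PySem.Set.ofList_eq_foldl, List.foldl_map, buildK,
    ← PySem.List.foldl_ite_eq_foldl_filter]

-- scanK skips a prefix of failing keys
lemma scanK_append_fail (l' : List (Int × List (String × String)))
    (ks t : List String) (h : ∀ s ∈ ks, qmem l' s = []) :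
    scanK l' (ks ++ t) = scanK l' t := by
  induction ks with
  | nil => rfl
  | cons s ss ih =>
      have hs := h s (List.mem_cons_self ..)
      simp only [List.cons_append, scanK, hs, ne_eq, not_true_eq_false, reduceIte]
      exact ih (fun a ha => h a (List.mem_cons_of_mem _ ha))

-- buildK only appends
lemma buildK_append (l : List (List (String × String))) (ks : List String) :
    ∃ t, buildK ks l = ks ++ t := by
  induction l generalizing ks with
  | nil => exact ⟨[], by simp [buildK]⟩
  | cons r rest ih =>
      rw [buildK_cons]
      by_cases h : altHid r ≠ ""
      · by_cases hm : altHid r ∈ ks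
        · rw [if_pos h, set_add_of_mem ks _ hm]
          exact ih ks
        · rw [if_pos h, set_add_of_not_mem ks _ hm]
          obtain ⟨t, ht⟩ := ih (ks ++ [altHid r])
          exact ⟨altHid r :: t, by simpa using ht⟩
      · rw [if_neg h]
        exact ih ks

-- the crux: scanning the first-seen key list = B's scan of the rows
lemma crux (rows : List (List (String × String)))
    (l : List (List (String × String))) (ks : List String)
    (hfail : ∀ s ∈ ks, qmem (vpairs rows) s = []) :
    scanK (vpairs rows) (buildK ks l)
      = altScan rows
          (PySem.Set.ofList
            ((rows.filter (fun r => decide (altHid r ≠ "") && altQualifies r)).map altHid)) l := by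
  set W := PySem.Set.ofList
    ((rows.filter (fun r => decide (altHid r ≠ "") && altQualifies r)).map altHid) with hW
  induction l generalizing ks with
  | nil =>
      have h0 := scanK_append_fail (vpairs rows) ks [] hfail
      rw [List.append_nil] at h0
      rw [show buildK ks [] = ks from rfl, h0]
      rfl
  | cons r rest ih =>
      rw [buildK_cons]
      by_cases hh : altHid r = ""
      · have hguard : PySem.Set.contains W (altHid r) = false := by
          rw [Bool.eq_false_iff]
          intro hc
          exact ((winners_mem rows _).mp (hW ▸ hc)).1 hh
        have hg' : altHid r ∉ W := by simpa [PySem.Set.contains] using hguard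
        rw [if_neg (by simpa using hh)]
        have halt : altScan rows W (r :: rest) = altScan rows W rest := by
          simp [altScan, hg']
        rw [halt]
        exact ih ks hfail
      · by_cases hq : qmem (vpairs rows) (altHid r) = []
        · have hguard : PySem.Set.contains W (altHid r) = false := by
            rw [Bool.eq_false_iff]
            intro hc
            exact ((winners_mem rows _).mp (hW ▸ hc)).2 hq
          have hg' : altHid r ∉ W := by simpa [PySem.Set.contains] using hguard
          have halt : altScan rows W (r :: rest) = altScan rows W rest := by
            simp [altScan, hg']
          rw [if_pos hh, halt]
          by_cases hm : altHid r ∈ ks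
          · rw [set_add_of_mem ks _ hm]
            exact ih ks hfail
          · rw [set_add_of_not_mem ks _ hm]
            refine ih (ks ++ [altHid r]) (fun s hs => ?_)
            rcases List.mem_append.mp hs with h1 | h1
            · exact hfail s h1
            · simp only [List.mem_singleton] at h1
              exact h1 ▸ hq
        · have hguard : PySem.Set.contains W (altHid r) = true :=
            hW ▸ (winners_mem rows _).mpr ⟨hh, hq⟩
          have hg' : altHid r ∈ W := by simpa [PySem.Set.contains] using hguard
          have halt : altScan rows W (r :: rest)
              = (some (altHid r), some (altCollect rows (altHid r))) := by
            simp [altScan, hg']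
          have hm : altHid r ∉ ks := fun hmem => hq (hfail _ hmem)
          rw [if_pos hh, halt, set_add_of_not_mem ks _ hm]
          obtain ⟨t, ht⟩ := buildK_append rest (ks ++ [altHid r])
          rw [ht, List.append_assoc, scanK_append_fail _ ks _ hfail,
            List.singleton_append]
          rw [show scanK (vpairs rows) (altHid r :: t)
              = if qmem (vpairs rows) (altHid r) ≠ []
                then (some (altHid r), some (qmem (vpairs rows) (altHid r)))
                else scanK (vpairs rows) t from rfl,
            if_pos hq, collect_eq_qmem rows _ hh]

theorem find_first_queued_household_spec : Claim_equal_find_first_queued_household := by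
  intro rows _
  show find_first_queued_household rows = find_first_queued_household_alt rows
  rw [A_eq_scanK, K_eq_buildK]
  exact crux rows rows [] (by intro s hs; cases hs)
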